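-- pv_equiv track=rewrite | github.com/f20500909/glove_cpp | scripts/test/show_vec.py | clear_words
-- ===== SOURCE A (Python) =====
-- def clear_words(show_words):
--     res1 = []
--     for words in show_words:
--         temp = []
--         for word in words:
--             if word != "":
--                 temp.append(word)
--         res1.append(temp)
--     res2 = []
--     color = []
--     for n, list in enumerate(res1):
--         for word in list:
--             color.append(n)
--             res2.append(word)
--     return color, res2
-- ===== SOURCE B (Python) =====
-- def clear_words(show_words):
--     def go(i, groups):
--         if not groups:
--             return [], []
--         color_rest, words_rest = go(i + 1, groups[1:])
--         kept = [w for w in groups[0] if w != ""]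
--         return [i] * len(kept) + color_rest, kept + words_rest
--     return go(0, show_words)
-- ===== Notes on version B (the rewrite author's own statement) =====
-- stated objective: alternative
-- what changed: Replaces A's iterative build-then-reflatten (intermediate nested list res1, then per-word appends into two accumulators) with structural recursion over the group list that builds the result back-to-front, producing each group's color segment at once by replication ([i]*len(kept)) and its word segment by list concatenation, with no per-word appends and no mutable accumulators; it trades speed on many groups for the recursive decomposition.
import Mathlib
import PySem

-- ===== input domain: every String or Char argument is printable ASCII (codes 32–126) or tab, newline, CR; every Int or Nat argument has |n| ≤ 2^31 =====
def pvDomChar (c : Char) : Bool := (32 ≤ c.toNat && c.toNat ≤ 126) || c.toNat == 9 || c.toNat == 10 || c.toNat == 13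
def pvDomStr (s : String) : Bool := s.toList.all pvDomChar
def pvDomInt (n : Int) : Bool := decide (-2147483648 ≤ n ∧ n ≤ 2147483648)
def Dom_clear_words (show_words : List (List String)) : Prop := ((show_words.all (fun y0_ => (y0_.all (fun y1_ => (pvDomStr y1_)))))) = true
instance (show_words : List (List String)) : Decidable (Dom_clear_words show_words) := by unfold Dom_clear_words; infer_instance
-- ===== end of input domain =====

-- B replaces A's iterative build-then-reflatten with a structural recursion that builds the
-- result back-to-front, emitting each group's colors by replication and its words by concatenation.


-- ===== PORT A =====
-- Port of A: phase 1 builds res1 (each group filtered of ""), phase 2 flattens res1 with enumerate.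
def clear_words (show_words : List (List String)) : List Int × List String :=
  let res1 : List (List String) :=
    show_words.foldl (fun r words =>
      r ++ [words.foldl (fun t w => if w ≠ "" then t ++ [w] else t) []]) []
  (PySem.List.enumerate res1 0).foldl
    (fun (q : List Int × List String) nl =>
      nl.2.foldl (fun q w => (q.1 ++ [nl.1], q.2 ++ [w])) q) ([], [])

-- ===== PORT B =====
-- Port of B: recursive helper go, building back-to-front; [i]*len(kept) = List.replicate.
def clear_words_go (i : Int) (groups : List (List String)) : List Int × List String :=
  match groups with
  | [] => ([], [])
  | ws :: rest =>
    let r := clear_words_go (i + 1) rest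
    let kept := ws.filter (fun w => w ≠ "")
    (List.replicate kept.length i ++ r.1, kept ++ r.2)

def clear_words_alt (show_words : List (List String)) : List Int × List String :=
  clear_words_go 0 show_words

-- ===== PRECONDITION & SPEC =====
def Spec_clear_words (show_words : List (List String)) (out : List Int × List String) : Prop := out = clear_words_alt show_words
instance (show_words : List (List String)) (out : List Int × List String) : Decidable (Spec_clear_words show_words out) := by unfold Spec_clear_words; infer_instance

-- ===== CLAIM (what is proved, stated in full; the proofs are below) =====
def Claim_equal_clear_words : Prop := ∀ (show_words : List (List String)), Dom_clear_words show_words → Spec_clear_words show_words (clear_words show_words)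

-- ===== LEMMAS AND PROOFS =====

-- A's inner per-word loop over a group appends n once per word and the words themselves
lemma inner_loop (l : List String) (n : Int) (p : List Int × List String) :
    l.foldl (fun (q : List Int × List String) w => (q.1 ++ [n], q.2 ++ [w])) p
      = (p.1 ++ List.replicate l.length n, p.2 ++ l) := by
  induction l generalizing p with
  | nil => simp
  | cons w l ih =>
    simp only [List.foldl_cons, ih, List.length_cons, List.replicate_succ,
      List.append_assoc, List.singleton_append]

-- A's phase-2 fold over the enumerated filtered groups equals B's recursion, up to the accumulator
lemma phase2_eq_go (sw : List (List String)) (s : Int) (p : List Int × List String) :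
    (PySem.List.enumerate (sw.map (fun ws => ws.filter (fun w => w ≠ ""))) s).foldl
        (fun (q : List Int × List String) nl =>
          nl.2.foldl (fun q w => (q.1 ++ [nl.1], q.2 ++ [w])) q) p
      = (p.1 ++ (clear_words_go s sw).1, p.2 ++ (clear_words_go s sw).2) := by
  induction sw generalizing s p with
  | nil => simp [clear_words_go]
  | cons ws sw ih =>
    rw [List.map_cons, PySem.List.enumerate_cons, List.foldl_cons, inner_loop, ih]
    simp [clear_words_go, List.append_assoc]

-- ===== VERDICT (by name: the statement is the Claim_ definition above) =====
theorem clear_words_spec : Claim_equal_clear_words := by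
  intro sw _
  unfold Spec_clear_words clear_words clear_words_alt
  simp only [PySem.List.foldl_append_singleton_eq_map, PySem.List.foldl_append_ite_eq_filter,
    List.nil_append]
  simpa using phase2_eq_go sw 0 ([], [])
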